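-- pv_equiv track=rewrite | github.com/rmd926/GPE-Practice | CPE考古題(按年份&月份)/CPE_其他一顆星(非49題選集)/uva_10424 Love Calculator.py | calc
-- ===== SOURCE A (Python) =====
-- def calc(name):
--     total = 0
--
--     for ch in name:
--         if 'a' <= ch <= 'z':
--             total += ord(ch) - ord('a') + 1
--         elif 'A' <= ch <= 'Z':
--             total += ord(ch) - ord('A') + 1
--
--     while total >= 10:
--         s = 0
--         while total > 0:
--             s += total % 10
--             total //= 10
--         total = s
--
--     return total
-- ===== SOURCE B (Python) =====
-- def calc(name):
--     total = sum(ord(c) & 31 for c in name if 'A' <= c <= 'Z' or 'a' <= c <= 'z')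
--     return 0 if total == 0 else 1 + (total - 1) % 9
-- ===== Notes on version B (the rewrite author's own statement) =====
-- stated objective: idiomatic
-- what changed: The nested repeated digit-sum while loops are replaced by the digital-root closed form 1 + (total-1) % 9 (with 0 for a letterless name), and the letter scan becomes a single sum over a filtered comprehension using ord(c) & 31.
import Mathlib
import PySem

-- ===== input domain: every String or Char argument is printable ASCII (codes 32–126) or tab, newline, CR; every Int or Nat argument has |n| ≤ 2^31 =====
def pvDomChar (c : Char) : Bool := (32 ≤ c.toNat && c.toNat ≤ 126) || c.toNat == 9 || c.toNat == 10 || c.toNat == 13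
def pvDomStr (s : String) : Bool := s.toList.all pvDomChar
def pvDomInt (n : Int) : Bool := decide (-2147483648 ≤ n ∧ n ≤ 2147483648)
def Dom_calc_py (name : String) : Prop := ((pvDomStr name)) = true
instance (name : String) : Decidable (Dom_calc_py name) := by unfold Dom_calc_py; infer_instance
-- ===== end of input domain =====

-- B replaces A's nested repeated-digit-sum loops by the digital-root closed form
-- (0 for a letterless name, else 1 + (total-1) % 9) and sums letters in one
-- filtered comprehension: idiomatic, not claimed faster.

-- ===== PORT A =====
-- inner 'while total > 0' loop of A: s += total % 10; total //= 10
-- (fuel makes the recursion structural; total.toNat iterations always suffice — proved in pvInner/pvOuter lemmas below)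
def pvInner : Nat → Int → Int → Int
  | 0, _, s => s
  | fuel + 1, total, s =>
    if 0 < total then
      pvInner fuel (PySem.Int.floordiv total 10) (s + PySem.Int.mod total 10)
    else s

-- outer 'while total >= 10' loop of A
def pvOuter : Nat → Int → Int
  | 0, total => total
  | fuel + 1, total =>
    if 10 ≤ total then pvOuter fuel (pvInner total.toNat total 0) else total

def calc_py (name : String) : Int :=
  let total := name.toList.foldl (fun total ch =>
    if 'a' ≤ ch ∧ ch ≤ 'z' then total + ((ch.toNat : Int) - ('a'.toNat : Int) + 1)
    else if 'A' ≤ ch ∧ ch ≤ 'Z' then total + ((ch.toNat : Int) - ('A'.toNat : Int) + 1)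
    else total) 0
  pvOuter total.toNat total

-- ===== PORT B =====
def calc_py_alt (name : String) : Int :=
  let total : Int :=
    ((name.toList.filter (fun c => decide (('A' ≤ c ∧ c ≤ 'Z') ∨ ('a' ≤ c ∧ c ≤ 'z')))).map
      (fun c => ((c.toNat &&& 31 : Nat) : Int))).sum
  if total = 0 then 0 else 1 + PySem.Int.mod (total - 1) 9

-- ===== PRECONDITION & SPEC =====
def Spec_calc_py (name : String) (out : Int) : Prop := out = calc_py_alt name
instance (name : String) (out : Int) : Decidable (Spec_calc_py name out) := by unfold Spec_calc_py; infer_instance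

-- ===== CLAIM (what is proved, stated in full; the proofs are below) =====
def Claim_equal_calc_py : Prop := ∀ (name : String), Dom_calc_py name → Spec_calc_py name (calc_py name)

-- ===== LEMMAS AND PROOFS =====

theorem pvInner_zero (f : Nat) (s : Int) : pvInner f 0 s = s := by
  cases f <;> simp [pvInner]

theorem pvInner_le (f : Nat) : ∀ total s : Int, 0 ≤ total → pvInner f total s ≤ s + total := by
  induction f with
  | zero => intro t s ht; simp only [pvInner]; omega
  | succ f ih =>
    intro t s ht
    by_cases h : 0 < t
    · simp only [pvInner]
      rw [if_pos h,
        PySem.Int.floordiv_eq_ediv_of_pos (by norm_num : (0:Int) < 10),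
        PySem.Int.mod_eq_emod_of_pos (by norm_num : (0:Int) < 10)]
      have := ih (t / 10) (s + t % 10) (by omega)
      omega
    · simp only [pvInner]; rw [if_neg h]; omega

theorem pvInner_pos (f : Nat) :
    ∀ total s : Int, 0 < total → 0 ≤ s → total.toNat ≤ f → 0 < pvInner f total s := by
  induction f with
  | zero => intro t s ht _ hf; omega
  | succ f ih =>
    intro t s ht hs hf
    simp only [pvInner]
    rw [if_pos ht,
      PySem.Int.floordiv_eq_ediv_of_pos (by norm_num : (0:Int) < 10),
      PySem.Int.mod_eq_emod_of_pos (by norm_num : (0:Int) < 10)]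
    by_cases h10 : 0 < t / 10
    · exact ih _ _ h10 (by omega) (by omega)
    · have hz : t / 10 = 0 := by omega
      rw [hz, pvInner_zero]
      omega

theorem pvInner_mod9 (f : Nat) :
    ∀ total s : Int, 0 ≤ total → total.toNat ≤ f →
      pvInner f total s % 9 = (total + s) % 9 := by
  induction f with
  | zero => intro t s ht hf; simp only [pvInner]; omega
  | succ f ih =>
    intro t s ht hf
    by_cases h : 0 < t
    · simp only [pvInner]
      rw [if_pos h,
        PySem.Int.floordiv_eq_ediv_of_pos (by norm_num : (0:Int) < 10),
        PySem.Int.mod_eq_emod_of_pos (by norm_num : (0:Int) < 10)]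
      rw [ih (t / 10) (s + t % 10) (by omega) (by omega)]
      omega
    · simp only [pvInner]; rw [if_neg h]; omega

theorem pvInner_lt (f : Nat) (t : Int) (ht : 10 ≤ t) : pvInner (f + 1) t 0 < t := by
  simp only [pvInner]
  rw [if_pos (by omega : (0:Int) < t),
    PySem.Int.floordiv_eq_ediv_of_pos (by norm_num : (0:Int) < 10),
    PySem.Int.mod_eq_emod_of_pos (by norm_num : (0:Int) < 10)]
  have := pvInner_le f (t / 10) (0 + t % 10) (by omega)
  omega

-- the digital-root closed form characterises A's outer reduction loop
theorem pvOuter_closed (f : Nat) :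
    ∀ total : Int, 0 ≤ total → total.toNat ≤ f →
      pvOuter f total = if total = 0 then 0 else 1 + PySem.Int.mod (total - 1) 9 := by
  induction f with
  | zero =>
    intro t ht hf
    have : t = 0 := by omega
    subst this
    simp [pvOuter]
  | succ f ih =>
    intro t ht hf
    by_cases h : 10 ≤ t
    · simp only [pvOuter]
      rw [if_pos h]
      have hd1 : 0 < pvInner t.toNat t 0 := pvInner_pos t.toNat t 0 (by omega) le_rfl le_rfl
      have hd2 : pvInner t.toNat t 0 < t := by
        obtain ⟨g, hg⟩ : ∃ g, t.toNat = g + 1 := ⟨t.toNat - 1, by omega⟩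
        rw [hg]
        exact pvInner_lt g t h
      have hm : pvInner t.toNat t 0 % 9 = (t + 0) % 9 := pvInner_mod9 t.toNat t 0 (by omega) le_rfl
      rw [ih (pvInner t.toNat t 0) (by omega) (by omega)]
      rw [if_neg (by omega), if_neg (by omega)]
      rw [PySem.Int.mod_eq_emod_of_pos (by norm_num : (0:Int) < 9),
          PySem.Int.mod_eq_emod_of_pos (by norm_num : (0:Int) < 9)]
      omega
    · simp only [pvOuter]
      rw [if_neg h]
      by_cases h0 : t = 0
      · rw [if_pos h0, h0]
      · rw [if_neg h0, PySem.Int.mod_eq_emod_of_pos (by norm_num : (0:Int) < 9)]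
        omega

-- B's per-letter value (ord c & 31) coincides with A's branch values on the letter ranges
theorem pvLetterVal_lower (c : Char) (h : 'a' ≤ c ∧ c ≤ 'z') :
    ((c.toNat &&& 31 : Nat) : Int) = (c.toNat : Int) - ('a'.toNat : Int) + 1 := by
  have hb : (97 ≤ c.toNat ∧ c.toNat ≤ 122) := h
  have ha : 'a'.toNat = 97 := rfl
  rw [Nat.and_two_pow_sub_one_eq_mod c.toNat 5, ha]
  omega

theorem pvLetterVal_upper (c : Char) (h : 'A' ≤ c ∧ c ≤ 'Z') :
    ((c.toNat &&& 31 : Nat) : Int) = (c.toNat : Int) - ('A'.toNat : Int) + 1 := by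
  have hb : (65 ≤ c.toNat ∧ c.toNat ≤ 90) := h
  have ha : 'A'.toNat = 65 := rfl
  rw [Nat.and_two_pow_sub_one_eq_mod c.toNat 5, ha]
  omega

-- A's letter-scan fold equals the start value plus B's filtered-map sum
theorem pvFold_eq (l : List Char) (t : Int) :
    l.foldl (fun total ch =>
      if 'a' ≤ ch ∧ ch ≤ 'z' then total + ((ch.toNat : Int) - ('a'.toNat : Int) + 1)
      else if 'A' ≤ ch ∧ ch ≤ 'Z' then total + ((ch.toNat : Int) - ('A'.toNat : Int) + 1)
      else total) t
    = t + ((l.filter (fun c => decide (('A' ≤ c ∧ c ≤ 'Z') ∨ ('a' ≤ c ∧ c ≤ 'z')))).map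
        (fun c => ((c.toNat &&& 31 : Nat) : Int))).sum := by
  induction l generalizing t with
  | nil => simp
  | cons c l ih =>
    simp only [List.foldl_cons, List.filter_cons]
    by_cases hlo : 'a' ≤ c ∧ c ≤ 'z'
    · rw [if_pos hlo, ih]
      rw [if_pos (by simp [hlo])]
      simp [pvLetterVal_lower c hlo]
      ring
    · rw [if_neg hlo]
      by_cases hup : 'A' ≤ c ∧ c ≤ 'Z'
      · rw [if_pos hup, ih]
        rw [if_pos (by simp [hup])]
        simp [pvLetterVal_upper c hup]
        ring
      · rw [ih]
        simp [hlo, hup]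

theorem pvSum_nonneg (l : List Char) :
    0 ≤ ((l.filter (fun c => decide (('A' ≤ c ∧ c ≤ 'Z') ∨ ('a' ≤ c ∧ c ≤ 'z')))).map
      (fun c => ((c.toNat &&& 31 : Nat) : Int))).sum := by
  apply List.sum_nonneg
  intro x hx
  obtain ⟨c, _, rfl⟩ := List.mem_map.mp hx
  positivity

-- ===== VERDICT (by name: the statement is the Claim_ definition above) =====
theorem calc_py_spec : Claim_equal_calc_py := by
  intro name _
  unfold Spec_calc_py calc_py calc_py_alt
  rw [pvFold_eq name.toList 0]
  rw [zero_add]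
  exact pvOuter_closed _ _ (pvSum_nonneg name.toList) le_rfl
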